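-- pv_equiv track=rewrite | github.com/alexandrosnic/youtube-playlist-downloader | login_and_download_song.py | generate_artist_name
-- ===== SOURCE A (Python) =====
-- def get_common_substring(string1, string2):
--     common_substring = ""
--     for i in range(len(string1)):
--         for j in range(len(string2)):
--             if string1[i] == string2[j]:
--                 # Found a matching character, start checking for common substring
--                 k = 1
--                 while (i + k < len(string1) and j + k < len(string2) and
--                        string1[i + k] == string2[j + k]):
--                     k += 1
--                 # Check if the found substring is longer than the current common substring
--                 if k > len(common_substring):
--                     common_substring = string1[i:i + k]
--     return common_substring
--
-- def generate_artist_name(title, artist, uploader, channel):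
--     if artist:
--         artist_or_uploader_or_channel = artist
--     elif channel:
--         artist_or_uploader_or_channel = channel
--     elif uploader:
--         artist_or_uploader_or_channel = uploader
--
--     if ' - Topic' in artist_or_uploader_or_channel:
--         artist_or_uploader_or_channel = artist_or_uploader_or_channel.replace(" - Topic", "")
--
--     is_substring_artist = any(
--         substring in channel for substring in
--         (artist_or_uploader_or_channel[i:j] for i in range(len(artist_or_uploader_or_channel)) for j in
--          range(i + 1, len(artist_or_uploader_or_channel) + 1)))
--     is_substring_title = any(
--         substring in channel for substring in (title[i:j] for i in range(len(title)) for j in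
--                                                range(i + 1, len(title) + 1)))
--     common_substring_artist = get_common_substring(artist_or_uploader_or_channel, channel)
--     common_substring_title = get_common_substring(title, channel)
--
--     if not is_substring_title:
--         if not is_substring_artist:
--             if not artist:
--                 artist_or_uploader_or_channel += f' ({channel})'
--             else:
--                 title += f' ({channel})'
--
--     artist_or_uploader_or_channel = remove_duplicate_names(artist_or_uploader_or_channel)
--
--     return artist_or_uploader_or_channel
--
-- def remove_duplicate_names(name):
--     # Split the name into individual artists
--     artists = name.split(', ')
--
--     # Remove duplicates while preserving the order
--     unique_artists = list(dict.fromkeys(artists))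
--
--     # Join the unique artists back into a single string
--     unique_name = ', '.join(unique_artists)
--
--     return unique_name
-- ===== SOURCE B (Python) =====
-- def generate_artist_name(title, artist, uploader, channel):
--     name = (artist or channel or uploader).replace(" - Topic", "")
--     chan = set(channel)
--     if not artist and not any(c in chan for c in title) and not any(c in chan for c in name):
--         name += f' ({channel})'
--     return ', '.join(dict.fromkeys(name.split(', ')))
-- ===== Notes on version B (the rewrite author's own statement) =====
-- stated objective: faster
-- what changed: B replaces A's test 'some substring of X occurs in channel' (all O(n^2) substrings, each searched in channel) by the equivalent single-pass character-set overlap test, and drops the two get_common_substring results A computes and never uses.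
import Mathlib
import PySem

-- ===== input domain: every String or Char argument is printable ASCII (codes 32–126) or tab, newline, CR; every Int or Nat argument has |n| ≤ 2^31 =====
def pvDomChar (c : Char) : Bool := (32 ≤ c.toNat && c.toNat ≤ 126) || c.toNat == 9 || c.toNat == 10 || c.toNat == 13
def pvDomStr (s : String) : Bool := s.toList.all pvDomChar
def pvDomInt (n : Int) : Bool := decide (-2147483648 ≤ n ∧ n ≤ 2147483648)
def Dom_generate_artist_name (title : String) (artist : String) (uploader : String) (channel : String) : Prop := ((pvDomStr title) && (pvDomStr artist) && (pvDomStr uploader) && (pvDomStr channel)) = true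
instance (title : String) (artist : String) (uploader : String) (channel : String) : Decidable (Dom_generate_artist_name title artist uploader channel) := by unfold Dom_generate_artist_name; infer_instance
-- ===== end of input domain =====

-- B replaces A's all-substrings-of-X-in-channel scan by a single character-overlap pass and drops
-- the two unused common-substring computations (objective: faster; equivalence of return values).

-- ===== PORT A =====
-- the inner 'while' of get_common_substring, fuel-bounded (fuel only makes the same loop total)
def pvWhileK (s1 s2 : List Char) (i j : Nat) (k : Nat) (fuel : Nat) : Nat :=
  match fuel with
  | 0 => k
  | fuel + 1 =>
    if i + k < s1.length ∧ j + k < s2.length ∧ s1[i + k]? = s2[j + k]? then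
      pvWhileK s1 s2 i j (k + 1) fuel
    else k

def get_common_substring (string1 : String) (string2 : String) : String :=
  let l1 := string1.toList
  let l2 := string2.toList
  let common := (List.range l1.length).foldl (fun common i =>
    (List.range l2.length).foldl (fun common j =>
      if l1[i]? = l2[j]? then
        let k := pvWhileK l1 l2 i j 1 (l1.length + l2.length)
        if k > common.length then (l1.drop i).take k else common
      else common) common) ([] : List Char)
  String.ofList common

-- any(substring in channel for substring in (x[i:j] for i in range(len(x)) for j in range(i+1, len(x)+1)))
def pvAllSubstrAny (x : String) (channel : String) : Bool :=
  (PySem.List.pyRange 0 (PySem.Str.len x) 1).any fun i =>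
    (PySem.List.pyRange (i + 1) (PySem.Str.len x + 1) 1).any fun j =>
      PySem.Str.isIn (PySem.Str.slice x (some i) (some j)) channel

def remove_duplicate_names (name : String) : String :=
  let artists := PySem.Chars.splitOn name.toList (", ".toList)
  let unique_artists := PySem.List.dedup artists
  String.ofList (PySem.Chars.join (", ".toList) unique_artists)

def generate_artist_name (title : String) (artist : String) (uploader : String) (channel : String) : String :=
  let aoc := if artist ≠ "" then artist else if channel ≠ "" then channel else uploader
  let aoc := if PySem.Str.isIn " - Topic" aoc then PySem.Str.replace aoc " - Topic" "" else aoc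
  let is_substring_artist := pvAllSubstrAny aoc channel
  let is_substring_title := pvAllSubstrAny title channel
  let _common_substring_artist := get_common_substring aoc channel
  let _common_substring_title := get_common_substring title channel
  let aoc :=
    if is_substring_title = false then
      if is_substring_artist = false then
        if artist = "" then String.ofList (aoc.toList ++ (" (".toList ++ channel.toList ++ ")".toList))
        else aoc  -- Python appends to the local 'title' here, which is discarded
      else aoc
    else aoc
  remove_duplicate_names aoc

-- ===== PORT B =====
def pvCharOverlap (s : String) (channel : String) : Bool :=
  s.toList.any fun c => channel.toList.contains c

def generate_artist_name_alt (title : String) (artist : String) (uploader : String) (channel : String) : String :=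
  let name := PySem.Str.replace (if artist ≠ "" then artist else if channel ≠ "" then channel else uploader) " - Topic" ""
  let name :=
    if artist = "" && !pvCharOverlap title channel && !pvCharOverlap name channel then
      String.ofList (name.toList ++ (" (".toList ++ channel.toList ++ ")".toList))
    else name
  remove_duplicate_names name

-- ===== PRECONDITION & SPEC =====
-- Pre_ excludes only the inputs where A raises UnboundLocalError: artist, channel and uploader all empty.
def Pre_generate_artist_name (title : String) (artist : String) (uploader : String) (channel : String) : Prop :=
  ¬ (artist = "" ∧ channel = "" ∧ uploader = "")
instance (title : String) (artist : String) (uploader : String) (channel : String) : Decidable (Pre_generate_artist_name title artist uploader channel) := by unfold Pre_generate_artist_name; infer_instance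
def pvWitness_generate_artist_name : String × String × String × String := ("Song", "Artist", "", "Chan")

def Spec_generate_artist_name (title : String) (artist : String) (uploader : String) (channel : String) (out : String) : Prop := out = generate_artist_name_alt title artist uploader channel
instance (title : String) (artist : String) (uploader : String) (channel : String) (out : String) : Decidable (Spec_generate_artist_name title artist uploader channel out) := by unfold Spec_generate_artist_name; infer_instance

-- ===== CLAIM (what is proved, stated in full; the proofs are below) =====
def Claim_equal_generate_artist_name : Prop := ∀ (title : String) (artist : String) (uploader : String) (channel : String), Dom_generate_artist_name title artist uploader channel → Pre_generate_artist_name title artist uploader channel → Spec_generate_artist_name title artist uploader channel (generate_artist_name title artist uploader channel)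

-- ===== LEMMAS AND PROOFS =====

-- slice x[a:b] for in-range Nat bounds, on the character list
theorem pv_slice_toList (x : String) (a b : Nat) :
    (PySem.Str.slice x (some (a : Int)) (some (b : Int))).toList
      = (x.toList.drop a).take (b - a) := by
  rw [PySem.Str.toList_slice, PySem.Chars.slice_eq_listSlice, PySem.List.slice_natCast]

-- replace is the identity when the pattern does not occur
theorem pv_replace_go_no_occ (old new : List Char) (fuel : Nat) :
    ∀ (l acc : List Char), old ≠ [] → ¬ old <:+: l →
      PySem.Chars.replace.go old new fuel l acc = acc.reverse ++ l := by
  induction fuel with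
  | zero => intro l acc _ _; simp [PySem.Chars.replace.go]
  | succ fuel ih =>
    intro l acc hne hni
    cases l with
    | nil => simp [PySem.Chars.replace.go]
    | cons c t =>
      have hpre : old.isPrefixOf (c :: t) = false := by
        by_contra h
        exact hni ((List.isPrefixOf_iff_prefix.mp (by revert h; cases old.isPrefixOf (c :: t) <;> simp)).isInfix)
      have hnt : ¬ old <:+: t := fun h => hni (List.infix_cons h)
      simp [PySem.Chars.replace.go, hpre, ih t (c :: acc) hne hnt]

theorem pv_replace_no_occ (s old new : String) (hne : old.toList ≠ [])
    (h : PySem.Str.isIn old s = false) : PySem.Str.replace s old new = s := by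
  have hni : ¬ old.toList <:+: s.toList := by
    simpa using (PySem.Chars.isIn_eq_false_iff old.toList s.toList).mp (by simpa using h)
  have hl : (PySem.Str.replace s old new).toList = s.toList := by
    rw [PySem.Str.toList_replace, PySem.Chars.replace]
    simp only [List.isEmpty_iff, hne]
    simpa using pv_replace_go_no_occ old.toList new.toList s.toList.length s.toList [] hne hni
  calc PySem.Str.replace s old new
      = String.ofList (PySem.Str.replace s old new).toList := String.ofList_toList.symm
    _ = String.ofList s.toList := by rw [hl]
    _ = s := String.ofList_toList

-- A's all-substrings membership test equals B's character-overlap test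
theorem pv_any_eq_overlap (x channel : String) : pvAllSubstrAny x channel = pvCharOverlap x channel := by
  unfold pvAllSubstrAny pvCharOverlap
  rw [Bool.eq_iff_iff]
  simp only [List.any_eq_true, PySem.List.mem_pyRange_one, PySem.Str.isIn_iff_infix,
    List.contains_eq_mem, decide_eq_true_eq, PySem.Str.len_eq]
  constructor
  · rintro ⟨i, ⟨hi0, hilen⟩, j, ⟨hij, hjlen⟩, hin⟩
    rw [show i = ((i.toNat : Nat) : Int) from (Int.toNat_of_nonneg hi0).symm,
        show j = ((j.toNat : Nat) : Int) from (Int.toNat_of_nonneg (by omega)).symm,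
        pv_slice_toList] at hin
    have hlt : i.toNat < x.toList.length := by omega
    have hdrop : x.toList.drop i.toNat = x.toList[i.toNat] :: x.toList.drop (i.toNat + 1) :=
      List.drop_eq_getElem_cons hlt
    rw [hdrop, show j.toNat - i.toNat = (j.toNat - i.toNat - 1) + 1 from by omega,
        List.take_succ_cons] at hin
    refine ⟨x.toList[i.toNat], List.getElem_mem hlt, ?_⟩
    exact hin.sublist.subset (by simp)
  · rintro ⟨c, hcx, hcch⟩
    obtain ⟨k, hk, hck⟩ := List.mem_iff_getElem.mp hcx
    refine ⟨(k : Int), ⟨by omega, by omega⟩, (k : Int) + 1, ⟨by omega, by omega⟩, ?_⟩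
    rw [show ((k : Int) + 1) = (((k + 1 : Nat) : Int)) from by push_cast; ring, pv_slice_toList,
        Nat.add_sub_cancel_left, List.drop_eq_getElem_cons hk, List.take_succ_cons, List.take_zero, hck]
    exact (List.singleton_infix_iff c channel.toList).mpr hcch

theorem generate_artist_name_eq (title artist uploader channel : String) :
    generate_artist_name title artist uploader channel
      = generate_artist_name_alt title artist uploader channel := by
  have hrepl : ∀ s : String,
      (if PySem.Str.isIn " - Topic" s then PySem.Str.replace s " - Topic" "" else s)
        = PySem.Str.replace s " - Topic" "" := by
    intro s
    cases h : PySem.Str.isIn " - Topic" s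
    · simpa using (pv_replace_no_occ s " - Topic" "" (by decide) h).symm
    · simp [h]
  simp only [generate_artist_name, generate_artist_name_alt, hrepl, pv_any_eq_overlap]
  generalize PySem.Str.replace (if artist ≠ "" then artist else if channel ≠ "" then channel else uploader) " - Topic" "" = nm
  cases hT : pvCharOverlap title channel <;> cases hA : pvCharOverlap nm channel <;>
    by_cases ha : artist = "" <;> simp [hT, hA, ha]

-- ===== VERDICT (by name: the statement is the Claim_ definition above) =====
theorem generate_artist_name_spec : Claim_equal_generate_artist_name := by
  intro title artist uploader channel _ _
  unfold Spec_generate_artist_name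
  exact generate_artist_name_eq title artist uploader channel
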